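-- pv_equiv track=rewrite | github.com/AlexLee1109/Akane | app/memory_store.py | _parse_relation_content
-- ===== SOURCE A (Python) =====
-- def _parse_relation_content(content: str) -> tuple[str, str] | None:
--     text = " ".join(content.strip().split())
--     if not text:
--         return None
--
--     patterns = (
--         ("doesn't want ", "does_not_want"),
--         ("doesn't like ", "does_not_like"),
--         ("prefers ", "prefers"),
--         ("likes ", "likes"),
--         ("loves ", "likes"),
--         ("enjoys ", "likes"),
--         ("wants ", "wants"),
--         ("needs ", "needs"),
--         ("uses ", "uses"),
--         ("using ", "uses"),
--         ("has ", "has"),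
--         ("on ", "uses"),
--     )
--     lowered = text.lower()
--     for prefix, relation in patterns:
--         if lowered.startswith(prefix):
--             return relation, text[len(prefix):].strip()
--     return None
-- ===== SOURCE B (Python) =====
-- _SINGLE = {
--     "prefers": "prefers",
--     "likes": "likes",
--     "loves": "likes",
--     "enjoys": "likes",
--     "wants": "wants",
--     "needs": "needs",
--     "uses": "uses",
--     "using": "uses",
--     "has": "has",
--     "on": "uses",
-- }
--
--
-- def _parse_relation_content(content: str):
--     words = content.split()
--     if not words:
--         return None
--     head = words[0].lower()
--     if head == "doesn't":
--         if len(words) >= 3: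
--             second = words[1].lower()
--             if second == "want":
--                 return "does_not_want", " ".join(words[2:])
--             if second == "like":
--                 return "does_not_like", " ".join(words[2:])
--         return None
--     rel = _SINGLE.get(head)
--     if rel is not None and len(words) >= 2:
--         return rel, " ".join(words[1:])
--     return None
-- ===== Notes on version B (the rewrite author's own statement) =====
-- stated objective: idiomatic
-- what changed: A normalizes the string and scans an ordered list of 12 lowered relation-keyword prefixes (each ending in a space) against the lowered text, slicing and re-stripping the remainder; B instead splits once into words, dispatches on the lowered first word via a keyword dict (with a dedicated branch for the two-word does-not-want / does-not-like forms) and joins the remaining original-case words.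
import Mathlib
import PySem

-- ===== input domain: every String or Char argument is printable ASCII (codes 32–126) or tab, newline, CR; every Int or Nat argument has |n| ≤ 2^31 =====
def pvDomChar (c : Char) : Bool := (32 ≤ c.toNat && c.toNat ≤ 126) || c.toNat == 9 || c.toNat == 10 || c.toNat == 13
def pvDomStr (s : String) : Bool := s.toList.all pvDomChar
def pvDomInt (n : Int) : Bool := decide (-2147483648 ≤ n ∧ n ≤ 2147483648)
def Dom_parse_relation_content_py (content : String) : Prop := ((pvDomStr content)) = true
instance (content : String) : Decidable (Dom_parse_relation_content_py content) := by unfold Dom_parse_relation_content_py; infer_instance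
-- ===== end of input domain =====

set_option maxRecDepth 8192

-- B replaces A's ordered scan of 12 "prefix " patterns over the normalized string by a
-- tokenization: split once into words, dispatch on the lowered first word via a keyword
-- dict (with a dedicated two-word branch for "doesn't want/like") and join the remaining
-- original-case words (objective: idiomatic; same behaviour, proved equal on all inputs).

-- ===== PORT A =====
def pvPatterns : List (String × String) :=
  [("doesn't want ", "does_not_want"),
   ("doesn't like ", "does_not_like"),
   ("prefers ", "prefers"),
   ("likes ", "likes"),
   ("loves ", "likes"),
   ("enjoys ", "likes"),
   ("wants ", "wants"),
   ("needs ", "needs"),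
   ("uses ", "uses"),
   ("using ", "uses"),
   ("has ", "has"),
   ("on ", "uses")]

-- the 'for prefix, relation in patterns' loop
def pvLoopA (lowered text : String) : List (String × String) → Option (String × String)
  | [] => none
  | (pfx, rel) :: rest =>
    if PySem.Str.startswith lowered pfx then
      some (rel, PySem.Str.strip (PySem.Str.slice text (some (PySem.Str.len pfx)) none))
    else pvLoopA lowered text rest

def parse_relation_content_py (content : String) : Option (String × String) :=
  let text := PySem.Str.join " " (PySem.Str.split₀ (PySem.Str.strip content))
  if text = "" then none
  else pvLoopA (PySem.Str.lower text) text pvPatterns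

-- ===== PORT B =====
def pvSingle : PySem.Dict String String :=
  PySem.Dict.ofList
    [("prefers", "prefers"), ("likes", "likes"), ("loves", "likes"),
     ("enjoys", "likes"), ("wants", "wants"), ("needs", "needs"),
     ("uses", "uses"), ("using", "uses"), ("has", "has"), ("on", "uses")]

def parse_relation_content_py_alt (content : String) : Option (String × String) :=
  let words := PySem.Str.split₀ content
  match words with
  | [] => none
  | w0 :: rest =>
    let head := PySem.Str.lower w0
    if head = "doesn't" then
      match rest with
      | w1 :: _ :: _ =>
        let second := PySem.Str.lower w1
        if second = "want" then some ("does_not_want", PySem.Str.join " " (rest.drop 1))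
        else if second = "like" then some ("does_not_like", PySem.Str.join " " (rest.drop 1))
        else none
      | _ => none
    else
      match PySem.Dict.get? pvSingle head, rest with
      | some rel, _ :: _ => some (rel, PySem.Str.join " " rest)
      | _, _ => none

-- ===== PRECONDITION & SPEC =====
def Spec_parse_relation_content_py (content : String) (out : Option (String × String)) : Prop := out = parse_relation_content_py_alt content
instance (content : String) (out : Option (String × String)) : Decidable (Spec_parse_relation_content_py content out) := by unfold Spec_parse_relation_content_py; infer_instance

-- ===== CLAIM (what is proved, stated in full; the proofs are below) =====
def Claim_equal_parse_relation_content_py : Prop := ∀ (content : String), Dom_parse_relation_content_py content → Spec_parse_relation_content_py content (parse_relation_content_py content)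

-- ===== LEMMAS AND PROOFS =====

-- structural spec of Python str.split(): words accumulated left to right
def pvWordsAux : List Char → List Char → List (List Char)
  | [], cur => if cur = [] then [] else [cur.reverse]
  | c :: rest, cur =>
    if PySem.Chars.isspace c then
      (if cur = [] then pvWordsAux rest [] else cur.reverse :: pvWordsAux rest [])
    else pvWordsAux rest (c :: cur)

theorem pvGo_eq (s : List Char) : ∀ (cur : List Char) (acc : List (List Char)),
    PySem.Chars.split₀.go s cur acc = acc.reverse ++ pvWordsAux s cur := by
  induction s with
  | nil => intro cur acc; by_cases h : cur = [] <;>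
      simp [PySem.Chars.split₀.go, pvWordsAux, h, List.isEmpty_iff]
  | cons c rest ih =>
      intro cur acc
      by_cases hs : PySem.Chars.isspace c <;> by_cases h : cur = [] <;>
        simp [PySem.Chars.split₀.go, pvWordsAux, hs, h, List.isEmpty_iff, ih]

theorem pvSplit₀_eq (s : List Char) : PySem.Chars.split₀ s = pvWordsAux s [] := by
  simp [PySem.Chars.split₀, pvGo_eq]


def pvNoSp (w : List Char) : Prop := ∀ c ∈ w, PySem.Chars.isspace c = false

def pvGood (ws : List (List Char)) : Prop := ∀ w ∈ ws, w ≠ [] ∧ pvNoSp w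

theorem pvWordsAux_spaces (t : List Char) (ht : ∀ c ∈ t, PySem.Chars.isspace c = true) :
    ∀ cur, pvWordsAux t cur = if cur = [] then [] else [cur.reverse] := by
  induction t with
  | nil => intro cur; simp [pvWordsAux]
  | cons c r ih =>
      intro cur
      have hc : PySem.Chars.isspace c = true := ht c (by simp)
      have hr : ∀ c ∈ r, PySem.Chars.isspace c = true := fun c hm => ht c (by simp [hm])
      by_cases h : cur = [] <;> simp [pvWordsAux, hc, h, ih hr]

theorem pvWordsAux_append_spaces (t : List Char) (ht : ∀ c ∈ t, PySem.Chars.isspace c = true) :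
    ∀ (s : List Char) (cur : List Char), pvWordsAux (s ++ t) cur = pvWordsAux s cur := by
  intro s
  induction s with
  | nil =>
      intro cur
      simpa [pvWordsAux] using pvWordsAux_spaces t ht cur
  | cons c r ih =>
      intro cur
      by_cases hc : PySem.Chars.isspace c <;> by_cases h : cur = [] <;>
        simp [pvWordsAux, hc, h, ih]

theorem pvWordsAux_lstrip (s : List Char) :
    pvWordsAux (PySem.Chars.lstrip s) [] = pvWordsAux s [] := by
  induction s with
  | nil => simp [PySem.Chars.lstrip]
  | cons c r ih =>
      by_cases hc : PySem.Chars.isspace c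
      · simpa [PySem.Chars.lstrip, List.dropWhile_cons, hc, pvWordsAux] using ih
      · simp [PySem.Chars.lstrip, hc]

theorem pvSplit₀_strip (s : List Char) :
    PySem.Chars.split₀ (PySem.Chars.strip s) = PySem.Chars.split₀ s := by
  rw [pvSplit₀_eq, pvSplit₀_eq, PySem.Chars.strip]
  have hdec : PySem.Chars.lstrip s =
      PySem.Chars.rstrip (PySem.Chars.lstrip s) ++
        (List.takeWhile PySem.Chars.isspace (PySem.Chars.lstrip s).reverse).reverse := by
    conv_lhs => rw [← List.reverse_reverse (PySem.Chars.lstrip s),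
      ← List.takeWhile_append_dropWhile (p := PySem.Chars.isspace)
        (l := (PySem.Chars.lstrip s).reverse)]
    rw [List.reverse_append, PySem.Chars.rstrip]
  have hsp : ∀ c ∈ (List.takeWhile PySem.Chars.isspace (PySem.Chars.lstrip s).reverse).reverse,
      PySem.Chars.isspace c = true := by
    intro c hc
    exact List.mem_takeWhile_imp (by simpa using hc)
  calc pvWordsAux (PySem.Chars.rstrip (PySem.Chars.lstrip s)) []
      = pvWordsAux (PySem.Chars.rstrip (PySem.Chars.lstrip s) ++
          (List.takeWhile PySem.Chars.isspace (PySem.Chars.lstrip s).reverse).reverse) [] :=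
        (pvWordsAux_append_spaces _ hsp _ _).symm
    _ = pvWordsAux (PySem.Chars.lstrip s) [] := by rw [← hdec]
    _ = pvWordsAux s [] := pvWordsAux_lstrip s

theorem pvGood_wordsAux (s : List Char) :
    ∀ cur, pvNoSp cur → pvGood (pvWordsAux s cur) := by
  induction s with
  | nil =>
      intro cur hcur
      by_cases h : cur = []
      · simp [pvWordsAux, h, pvGood]
      · intro w hw
        simp [pvWordsAux, h] at hw
        subst hw
        exact ⟨by simpa using h, fun c hc => hcur c (by simpa using hc)⟩
  | cons c r ih =>
      intro cur hcur
      by_cases hc : PySem.Chars.isspace c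
      · by_cases h : cur = []
        · simpa [pvWordsAux, hc, h] using ih [] (by simp [pvNoSp])
        · intro w hw
          simp [pvWordsAux, hc, h] at hw
          rcases hw with hw | hw
          · subst hw
            exact ⟨by simpa using h, fun d hd => hcur d (by simpa using hd)⟩
          · exact ih [] (by simp [pvNoSp]) w hw
      · have hcur' : pvNoSp (c :: cur) := by
          intro d hd
          rcases List.mem_cons.1 hd with rfl | hd
          · simpa using hc
          · exact hcur d hd
        simpa [pvWordsAux, hc] using ih (c :: cur) hcur'

theorem pvGood_split₀ (s : List Char) : pvGood (PySem.Chars.split₀ s) := by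
  rw [pvSplit₀_eq]; exact pvGood_wordsAux s [] (by simp [pvNoSp])


theorem pvIsspace_lowerChar (c : Char) :
    PySem.Chars.isspace (PySem.Chars.lowerChar c) = PySem.Chars.isspace c := by
  unfold PySem.Chars.lowerChar
  by_cases hu : PySem.Chars.isupper c = true
  · have h1 : 'A' ≤ c ∧ c ≤ 'Z' := by
      simpa [PySem.Chars.isupper] using hu
    obtain ⟨ha, hb⟩ := h1
    rw [Char.le_def] at ha hb
    have hlo : 65 ≤ c.toNat := ha
    have hhi : c.toNat ≤ 90 := hb
    have hval : (c.toNat + 32).isValidChar := Or.inl (by omega)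
    have htn : (Char.ofNat (c.toNat + 32)).toNat = c.toNat + 32 := by
      rw [Char.toNat_ofNat, if_pos hval]
    have e1 : PySem.Chars.isspace (Char.ofNat (c.toNat + 32)) = false := by
      simp only [PySem.Chars.isspace, htn, Bool.or_eq_false_iff, Bool.and_eq_false_iff,
        decide_eq_false_iff_not]
      omega
    have e2 : PySem.Chars.isspace c = false := by
      simp only [PySem.Chars.isspace, Bool.or_eq_false_iff, Bool.and_eq_false_iff,
        decide_eq_false_iff_not]
      omega
    simp [hu, e1, e2]
  · simp [hu]

theorem pvJoin_cons (w : List Char) (r : List (List Char)) :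
    PySem.Chars.join [' '] (w :: r) =
      w ++ (if r = [] then [] else ' ' :: PySem.Chars.join [' '] r) := by
  cases r with
  | nil => simp [PySem.Chars.join_singleton]
  | cons b t => simp [PySem.Chars.join_cons_cons]

theorem pvLower_join (ws : List (List Char)) :
    PySem.Chars.lower (PySem.Chars.join [' '] ws) =
      PySem.Chars.join [' '] (ws.map PySem.Chars.lower) := by
  induction ws with
  | nil => simp [PySem.Chars.join_nil, PySem.Chars.lower]
  | cons w r ih =>
      cases r with
      | nil => simp [PySem.Chars.join_singleton]
      | cons b t =>
          have : PySem.Chars.lowerChar ' ' = ' ' := by decide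
          simp [PySem.Chars.join_cons_cons, PySem.Chars.lower] at ih ⊢
          simp [this, ih]

theorem pvLength_lower (w : List Char) :
    (PySem.Chars.lower w).length = w.length := by simp [PySem.Chars.lower]

theorem pvGood_lower (ws : List (List Char)) (h : pvGood ws) :
    pvGood (ws.map PySem.Chars.lower) := by
  intro w hw
  rcases List.mem_map.1 hw with ⟨v, hv, rfl⟩
  obtain ⟨hne, hns⟩ := h v hv
  refine ⟨by simpa [PySem.Chars.lower] using hne, ?_⟩
  intro c hc
  rcases List.mem_map.1 hc with ⟨d, hd, rfl⟩
  rw [pvIsspace_lowerChar]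
  exact hns d hd

theorem pvJoin_ne_nil (ws : List (List Char)) (hne : ws ≠ []) (hg : pvGood ws) :
    PySem.Chars.join [' '] ws ≠ [] := by
  cases ws with
  | nil => exact absurd rfl hne
  | cons w r =>
      have hw := (hg w (by simp)).1
      rw [pvJoin_cons]
      simp [hw]

theorem pvJoin_append (ps rs : List (List Char)) (hps : ps ≠ []) (hrs : rs ≠ []) :
    PySem.Chars.join [' '] (ps ++ rs) =
      PySem.Chars.join [' '] ps ++ ' ' :: PySem.Chars.join [' '] rs := by
  induction ps with
  | nil => exact absurd rfl hps
  | cons p pt ih =>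
      cases pt with
      | nil =>
          cases rs with
          | nil => exact absurd rfl hrs
          | cons b t => simp [PySem.Chars.join_cons_cons, PySem.Chars.join_singleton]
      | cons q qt =>
          have := ih (by simp)
          simp only [List.cons_append, PySem.Chars.join_cons_cons] at this ⊢
          simp [this]


theorem pvPrefix_core (p : List Char) :
    ∀ (w u v : List Char), pvNoSp p → pvNoSp w →
      (p ++ ' ' :: u) <+: (w ++ ' ' :: v) → p = w ∧ u <+: v := by
  induction p with
  | nil =>
      intro w u v _ hw h
      cases w with
      | nil => exact ⟨rfl, by simpa using h⟩
      | cons c w' =>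
          exfalso
          rcases h with ⟨t, ht⟩
          simp at ht
          have := hw c (by simp)
          rw [← ht.1] at this
          simp [PySem.Chars.isspace] at this
  | cons a p' ih =>
      intro w u v hp hw h
      cases w with
      | nil =>
          exfalso
          rcases h with ⟨t, ht⟩
          simp at ht
          have := hp a (by simp)
          rw [ht.1] at this
          simp [PySem.Chars.isspace] at this
      | cons c w' =>
          rcases h with ⟨t, ht⟩
          simp at ht
          obtain ⟨rfl, ht⟩ := ht
          have hp' : pvNoSp p' := fun d hd => hp d (by simp [hd])
          have hw' : pvNoSp w' := fun d hd => hw d (by simp [hd])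
          obtain ⟨rfl, hpre⟩ := ih w' u v hp' hw' ⟨t, by simpa using ht⟩
          exact ⟨rfl, hpre⟩

theorem pvNoPrefix_single (p : List Char) :
    ∀ (w u : List Char), pvNoSp w → ¬ ((p ++ ' ' :: u) <+: w) := by
  induction p with
  | nil =>
      intro w u hw h
      cases w with
      | nil => simp at h
      | cons c w' =>
          rcases h with ⟨t, ht⟩
          simp at ht
          have := hw c (by simp)
          rw [← ht.1] at this
          simp [PySem.Chars.isspace] at this
  | cons a p' ih =>
      intro w u hw h
      cases w with
      | nil => simp at h
      | cons c w' =>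
          rcases h with ⟨t, ht⟩
          simp at ht
          exact ih w' u (fun d hd => hw d (by simp [hd])) ⟨t, by simpa using ht.2⟩

theorem pvStartswith_iff (ps : List (List Char)) :
    ∀ (ws : List (List Char)), pvGood ps → ps ≠ [] → pvGood ws →
      ((PySem.Chars.join [' '] ps ++ [' ']) <+: PySem.Chars.join [' '] ws ↔
        ∃ rest, rest ≠ [] ∧ ws = ps ++ rest) := by
  induction ps with
  | nil => intro ws _ h; exact absurd rfl h
  | cons p pt ih =>
      intro ws hgp _ hgw
      constructor
      · intro h
        cases ws with
        | nil =>
            exfalso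
            rw [PySem.Chars.join_nil, List.prefix_nil] at h
            simp at h
        | cons w wt =>
            cases wt with
            | nil =>
                exfalso
                rw [pvJoin_cons p pt, PySem.Chars.join_singleton] at h
                have hnsw := (hgw w (by simp)).2
                by_cases hpt : pt = []
                · subst hpt
                  simp at h
                  exact pvNoPrefix_single p w [] hnsw h
                · rw [if_neg hpt] at h
                  exact pvNoPrefix_single p w _ hnsw (by simpa using h)
            | cons w1 wt' =>
                rw [pvJoin_cons p pt, PySem.Chars.join_cons_cons] at h
                have hnsp := (hgp p (by simp)).2
                have hnsw := (hgw w (by simp)).2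
                by_cases hpt : pt = []
                · subst hpt
                  simp at h
                  have h' : (p ++ ' ' :: []) <+: (w ++ ' ' :: PySem.Chars.join [' '] (w1 :: wt')) := by
                    simpa using h
                  obtain ⟨rfl, _⟩ := pvPrefix_core p w [] _ hnsp hnsw h'
                  exact ⟨w1 :: wt', by simp⟩
                · rw [if_neg hpt] at h
                  have h' : (p ++ ' ' :: (PySem.Chars.join [' '] pt ++ [' '])) <+:
                      (w ++ ' ' :: PySem.Chars.join [' '] (w1 :: wt')) := by
                    simpa using h
                  obtain ⟨rfl, hpre⟩ := pvPrefix_core p w _ _ hnsp hnsw h'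
                  have hgp' : pvGood pt := fun x hx => hgp x (by simp [hx])
                  have hgw' : pvGood (w1 :: wt') := fun x hx => hgw x (by simp [hx])
                  obtain ⟨rest, hrne, hre⟩ := (ih (w1 :: wt') hgp' hpt hgw').1 hpre
                  exact ⟨rest, hrne, by simp [hre]⟩
      · rintro ⟨rest, hrne, rfl⟩
        rw [pvJoin_append (p :: pt) rest (by simp) hrne]
        exact ⟨PySem.Chars.join [' '] rest, by simp⟩

theorem pvDrop_join (ps rest : List (List Char)) (hps : ps ≠ []) (hrest : rest ≠ []) :
    (PySem.Chars.join [' '] (ps ++ rest)).drop ((PySem.Chars.join [' '] ps).length + 1) =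
      PySem.Chars.join [' '] rest := by
  rw [pvJoin_append ps rest hps hrest]
  have : PySem.Chars.join [' '] ps ++ ' ' :: PySem.Chars.join [' '] rest =
      (PySem.Chars.join [' '] ps ++ [' ']) ++ PySem.Chars.join [' '] rest := by simp
  rw [this]
  have hl : (PySem.Chars.join [' '] ps ++ [' ']).length =
      (PySem.Chars.join [' '] ps).length + 1 := by simp
  rw [← hl, List.drop_left]

theorem pvJoin_reverse (ws : List (List Char)) :
    (PySem.Chars.join [' '] ws).reverse =
      PySem.Chars.join [' '] (ws.reverse.map List.reverse) := by
  induction ws with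
  | nil => simp [PySem.Chars.join_nil]
  | cons w r ih =>
      cases r with
      | nil => simp [PySem.Chars.join_singleton]
      | cons b t =>
          rw [PySem.Chars.join_cons_cons]
          have hne1 : ((b :: t).reverse.map List.reverse) ≠ [] := by simp
          have : (w :: b :: t).reverse.map List.reverse =
              ((b :: t).reverse.map List.reverse) ++ [w.reverse] := by simp
          rw [this, pvJoin_append _ _ hne1 (by simp), ← ih, PySem.Chars.join_singleton]
          simp

theorem pvHead_join (ws : List (List Char)) (hg : pvGood ws) (c : Char) (t : List Char)
    (h : PySem.Chars.join [' '] ws = c :: t) : PySem.Chars.isspace c = false := by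
  cases ws with
  | nil => simp [PySem.Chars.join_nil] at h
  | cons w r =>
      obtain ⟨hne, hns⟩ := hg w (by simp)
      cases w with
      | nil => exact absurd rfl hne
      | cons d w' =>
          rw [pvJoin_cons] at h
          simp at h
          rw [← h.1]
          exact hns d (by simp)

theorem pvStrip_join (ws : List (List Char)) (_hne : ws ≠ []) (hg : pvGood ws) :
    PySem.Chars.strip (PySem.Chars.join [' '] ws) = PySem.Chars.join [' '] ws := by
  have hgr : pvGood (ws.reverse.map List.reverse) := by
    intro w hw
    rcases List.mem_map.1 hw with ⟨v, hv, rfl⟩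
    obtain ⟨h1, h2⟩ := hg v (List.mem_reverse.1 hv)
    exact ⟨by simpa using h1, fun c hc => h2 c (List.mem_reverse.1 hc)⟩
  -- lstrip is the identity: the first character is not whitespace
  have hl : PySem.Chars.lstrip (PySem.Chars.join [' '] ws) = PySem.Chars.join [' '] ws := by
    cases hj : PySem.Chars.join [' '] ws with
    | nil => simp [PySem.Chars.lstrip]
    | cons c t =>
        have := pvHead_join ws hg c t hj
        simp [PySem.Chars.lstrip, this]
  -- rstrip is the identity: the last character is not whitespace
  have hr : PySem.Chars.rstrip (PySem.Chars.join [' '] ws) = PySem.Chars.join [' '] ws := by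
    rw [PySem.Chars.rstrip, pvJoin_reverse]
    cases hj : PySem.Chars.join [' '] (ws.reverse.map List.reverse) with
    | nil =>
        have h0 : (PySem.Chars.join [' '] ws).reverse = [] := by rw [pvJoin_reverse, hj]
        rw [List.reverse_eq_nil_iff] at h0
        simp [h0]
    | cons c t =>
        have hns := pvHead_join _ hgr c t hj
        rw [List.dropWhile_cons, hns]
        rw [← hj, ← pvJoin_reverse]
        simp
  rw [PySem.Chars.strip, hl, hr]


theorem pvToList_text (W : List String) :
    (PySem.Str.join " " W).toList = PySem.Chars.join [' '] (W.map String.toList) := by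
  rw [PySem.Str.toList_join]
  have h : (" ".toList) = [' '] := rfl
  rw [h]

theorem pvLowered_toList (W : List String) :
    (PySem.Str.lower (PySem.Str.join " " W)).toList =
      PySem.Chars.join [' '] (W.map (fun s => PySem.Chars.lower s.toList)) := by
  rw [PySem.Str.toList_lower, pvToList_text, pvLower_join, List.map_map]
  rfl

theorem pvCondSingle (w0 : String) (rest : List String)
    (hg : pvGood (List.map String.toList (w0 :: rest)))
    (pfx k : String) (hpk : pfx.toList = k.toList ++ [' '])
    (hns : pvNoSp k.toList) (hkne : k.toList ≠ []) :
    (PySem.Str.startswith (PySem.Str.lower (PySem.Str.join " " (w0 :: rest))) pfx = true)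
      ↔ (PySem.Str.lower w0 = k ∧ rest ≠ []) := by
  rw [PySem.Str.startswith_eq, PySem.Chars.startswith_iff, pvLowered_toList, hpk]
  have hgl : pvGood ((w0 :: rest).map (fun s => PySem.Chars.lower s.toList)) := by
    have := pvGood_lower _ hg
    simpa [List.map_map, Function.comp] using this
  rw [show k.toList = PySem.Chars.join [' '] [k.toList] from
    (PySem.Chars.join_singleton [' '] k.toList).symm]
  rw [pvStartswith_iff [k.toList] _
    (by intro w hw; simp at hw; subst hw; exact ⟨hkne, hns⟩) (by simp) hgl]
  constructor
  · rintro ⟨r, hrne, hre⟩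
    simp only [List.map_cons, List.singleton_append, List.cons.injEq] at hre
    obtain ⟨h1, h2⟩ := hre
    refine ⟨by rw [← String.toList_inj, PySem.Str.toList_lower]; exact h1, ?_⟩
    intro hr0
    subst hr0
    simp at h2
    exact hrne h2
  · rintro ⟨h1, h2⟩
    refine ⟨rest.map (fun s => PySem.Chars.lower s.toList), by simpa using h2, ?_⟩
    have hl : PySem.Chars.lower w0.toList = k.toList := by
      rw [← PySem.Str.toList_lower, h1]
    simp [hl]

theorem pvCondDouble (w0 : String) (rest : List String)
    (hg : pvGood (List.map String.toList (w0 :: rest)))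
    (pfx k1 k2 : String) (hpk : pfx.toList = (k1.toList ++ ' ' :: k2.toList) ++ [' '])
    (hns1 : pvNoSp k1.toList) (hkne1 : k1.toList ≠ [])
    (hns2 : pvNoSp k2.toList) (hkne2 : k2.toList ≠ []) :
    (PySem.Str.startswith (PySem.Str.lower (PySem.Str.join " " (w0 :: rest))) pfx = true)
      ↔ (PySem.Str.lower w0 = k1 ∧
          ∃ w1 t, rest = w1 :: t ∧ PySem.Str.lower w1 = k2 ∧ t ≠ []) := by
  rw [PySem.Str.startswith_eq, PySem.Chars.startswith_iff, pvLowered_toList, hpk]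
  have hgl : pvGood ((w0 :: rest).map (fun s => PySem.Chars.lower s.toList)) := by
    have := pvGood_lower _ hg
    simpa [List.map_map, Function.comp] using this
  have hjoin2 : PySem.Chars.join [' '] [k1.toList, k2.toList] =
      k1.toList ++ ' ' :: k2.toList := by
    rw [PySem.Chars.join_cons_cons, PySem.Chars.join_singleton]
    simp
  rw [show k1.toList ++ ' ' :: k2.toList = PySem.Chars.join [' '] [k1.toList, k2.toList] from
    hjoin2.symm]
  rw [pvStartswith_iff [k1.toList, k2.toList] _
    (by intro w hw; simp at hw
        rcases hw with rfl | rfl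
        exacts [⟨hkne1, hns1⟩, ⟨hkne2, hns2⟩]) (by simp) hgl]
  constructor
  · rintro ⟨r, hrne, hre⟩
    cases rest with
    | nil => simp at hre
    | cons w1 t =>
        simp only [List.map_cons, List.cons_append, List.nil_append, List.cons.injEq] at hre
        obtain ⟨h1, h2, h3⟩ := hre
        refine ⟨by rw [← String.toList_inj, PySem.Str.toList_lower]; exact h1,
          w1, t, rfl, by rw [← String.toList_inj, PySem.Str.toList_lower]; exact h2, ?_⟩
        intro ht0
        subst ht0
        simp at h3
        exact hrne h3
  · rintro ⟨h1, w1, t, rfl, h2, h3⟩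
    refine ⟨t.map (fun s => PySem.Chars.lower s.toList), by simpa using h3, ?_⟩
    have hl1 : PySem.Chars.lower w0.toList = k1.toList := by
      rw [← PySem.Str.toList_lower, h1]
    have hl2 : PySem.Chars.lower w1.toList = k2.toList := by
      rw [← PySem.Str.toList_lower, h2]
    simp [hl1, hl2]

theorem pvRemainder (ps rs : List String)
    (hg : pvGood (List.map String.toList (ps ++ rs)))
    (hps : ps ≠ []) (hrs : rs ≠ []) (n : Int)
    (hn : n = ((PySem.Chars.join [' '] (ps.map String.toList)).length : Int) + 1) :
    PySem.Str.strip (PySem.Str.slice (PySem.Str.join " " (ps ++ rs)) (some n) none) =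
      PySem.Str.join " " rs := by
  have hn0 : 0 ≤ n := by rw [hn]; positivity
  rw [← String.toList_inj, PySem.Str.toList_strip, PySem.Str.toList_slice,
    PySem.Chars.slice_eq_listSlice, PySem.List.slice_from _ hn0]
  rw [pvToList_text, pvToList_text]
  have hmap : (ps ++ rs).map String.toList = ps.map String.toList ++ rs.map String.toList :=
    List.map_append ..
  rw [hmap]
  have hgr : pvGood (rs.map String.toList) := by
    intro w hw
    exact hg w (by rw [hmap]; exact List.mem_append_right _ hw)
  have hnt : n.toNat = (PySem.Chars.join [' '] (ps.map String.toList)).length + 1 := by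
    omega
  rw [hnt, pvDrop_join (ps.map String.toList) (rs.map String.toList)
    (by simpa using hps) (by simpa using hrs)]
  exact pvStrip_join _ (by simpa using hrs) hgr


theorem pvLen_toList_of_lower (w k : String) (h : PySem.Str.lower w = k) :
    w.toList.length = k.toList.length := by
  have h2 := congrArg String.toList h
  rw [PySem.Str.toList_lower] at h2
  rw [← h2, pvLength_lower]

theorem pvSingleHit (w0 r0 : String) (rt : List String)
    (hg : pvGood (List.map String.toList (w0 :: r0 :: rt)))
    (k : String) (hk : PySem.Str.lower w0 = k) (n : Int)
    (hn : n = (k.toList.length : Int) + 1) :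
    PySem.Str.strip (PySem.Str.slice (PySem.Str.join " " (w0 :: r0 :: rt)) (some n) none) =
      PySem.Str.join " " (r0 :: rt) := by
  have hlen := pvLen_toList_of_lower w0 k hk
  have := pvRemainder [w0] (r0 :: rt) (by simpa using hg) (by simp) (by simp) n
    (by simp [PySem.Chars.join_singleton, hlen, hn])
  simpa using this

theorem pvDoubleHit (w0 w1 r0 : String) (rt : List String)
    (hg : pvGood (List.map String.toList (w0 :: w1 :: r0 :: rt)))
    (k1 k2 : String) (hk1 : PySem.Str.lower w0 = k1) (hk2 : PySem.Str.lower w1 = k2) (n : Int)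
    (hn : n = (k1.toList.length : Int) + (k2.toList.length : Int) + 2) :
    PySem.Str.strip (PySem.Str.slice (PySem.Str.join " " (w0 :: w1 :: r0 :: rt)) (some n) none) =
      PySem.Str.join " " (r0 :: rt) := by
  have hlen1 := pvLen_toList_of_lower w0 k1 hk1
  have hlen2 := pvLen_toList_of_lower w1 k2 hk2
  have hj : (PySem.Chars.join [' '] ([w0, w1].map String.toList)).length =
      w0.toList.length + w1.toList.length + 1 := by
    simp [PySem.Chars.join_cons_cons, PySem.Chars.join_singleton]
    omega
  have := pvRemainder [w0, w1] (r0 :: rt) (by simpa using hg) (by simp) (by simp) n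
    (by rw [hj, hlen1, hlen2, hn]; push_cast; ring)
  simpa using this


theorem pvNoSp_of_all (w : List Char)
    (h : w.all (fun c => !PySem.Chars.isspace c) = true) : pvNoSp w := by
  intro c hc
  have := List.all_eq_true.1 h c hc
  simpa using this

theorem pvItems_single : pvSingle.items =
    [("prefers", "prefers"), ("likes", "likes"), ("loves", "likes"),
     ("enjoys", "likes"), ("wants", "wants"), ("needs", "needs"),
     ("uses", "uses"), ("using", "uses"), ("has", "has"), ("on", "uses")] := by decide

theorem pvGet_none (h : String)
    (h1 : ¬ h = "prefers") (h2 : ¬ h = "likes") (h3 : ¬ h = "loves") (h4 : ¬ h = "enjoys")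
    (h5 : ¬ h = "wants") (h6 : ¬ h = "needs") (h7 : ¬ h = "uses") (h8 : ¬ h = "using")
    (h9 : ¬ h = "has") (h10 : ¬ h = "on") :
    PySem.Dict.get? pvSingle h = none := by
  simp [PySem.Dict.get?, pvItems_single]
  exact ⟨fun e => h1 e.symm, fun e => h2 e.symm, fun e => h3 e.symm, fun e => h4 e.symm,
    fun e => h5 e.symm, fun e => h6 e.symm, fun e => h7 e.symm, fun e => h8 e.symm,
    fun e => h9 e.symm, fun e => h10 e.symm⟩

theorem pvMain (content : String) :
    parse_relation_content_py content = parse_relation_content_py_alt content := by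
  have hinj : Function.Injective (List.map String.toList) :=
    List.map_injective_iff.2 fun a b h => String.toList_inj.1 h
  have hstrip : PySem.Str.split₀ (PySem.Str.strip content) = PySem.Str.split₀ content := by
    apply hinj
    rw [PySem.Str.split₀_map_toList, PySem.Str.split₀_map_toList, PySem.Str.toList_strip,
      pvSplit₀_strip]
  have hgood : pvGood (List.map String.toList (PySem.Str.split₀ content)) := by
    rw [PySem.Str.split₀_map_toList]; exact pvGood_split₀ content.toList
  simp only [parse_relation_content_py, parse_relation_content_py_alt, hstrip]
  cases hws : PySem.Str.split₀ content with
  | nil =>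
      have he : PySem.Str.join " " ([] : List String) = "" := by
        rw [← String.toList_inj, pvToList_text]
        simp [PySem.Chars.join_nil]
      simp [he]
  | cons w0 rest =>
      rw [hws] at hgood
      have htextne : ¬ (PySem.Str.join " " (w0 :: rest) = "") := by
        intro h
        have h2 := congrArg String.toList h
        rw [pvToList_text] at h2
        exact pvJoin_ne_nil _ (by simp) hgood (by simpa using h2)
      have C1 := pvCondDouble w0 rest hgood "doesn't want " "doesn't" "want"
        (by decide) (pvNoSp_of_all _ (by decide)) (by decide) (pvNoSp_of_all _ (by decide)) (by decide)
      have C2 := pvCondDouble w0 rest hgood "doesn't like " "doesn't" "like"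
        (by decide) (pvNoSp_of_all _ (by decide)) (by decide) (pvNoSp_of_all _ (by decide)) (by decide)
      have C3 := pvCondSingle w0 rest hgood "prefers " "prefers" (by decide) (pvNoSp_of_all _ (by decide)) (by decide)
      have C4 := pvCondSingle w0 rest hgood "likes " "likes" (by decide) (pvNoSp_of_all _ (by decide)) (by decide)
      have C5 := pvCondSingle w0 rest hgood "loves " "loves" (by decide) (pvNoSp_of_all _ (by decide)) (by decide)
      have C6 := pvCondSingle w0 rest hgood "enjoys " "enjoys" (by decide) (pvNoSp_of_all _ (by decide)) (by decide)
      have C7 := pvCondSingle w0 rest hgood "wants " "wants" (by decide) (pvNoSp_of_all _ (by decide)) (by decide)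
      have C8 := pvCondSingle w0 rest hgood "needs " "needs" (by decide) (pvNoSp_of_all _ (by decide)) (by decide)
      have C9 := pvCondSingle w0 rest hgood "uses " "uses" (by decide) (pvNoSp_of_all _ (by decide)) (by decide)
      have C10 := pvCondSingle w0 rest hgood "using " "using" (by decide) (pvNoSp_of_all _ (by decide)) (by decide)
      have C11 := pvCondSingle w0 rest hgood "has " "has" (by decide) (pvNoSp_of_all _ (by decide)) (by decide)
      have C12 := pvCondSingle w0 rest hgood "on " "on" (by decide) (pvNoSp_of_all _ (by decide)) (by decide)
      rw [if_neg htextne]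
      simp only [pvPatterns, pvLoopA]
      by_cases hd : PySem.Str.lower w0 = "doesn't"
      · -- first word is "doesn't": only the two-word patterns can fire
        have n3 : ¬ _ := fun h => absurd ((C3.1 h).1.symm.trans hd) (by decide)
        have n4 : ¬ _ := fun h => absurd ((C4.1 h).1.symm.trans hd) (by decide)
        have n5 : ¬ _ := fun h => absurd ((C5.1 h).1.symm.trans hd) (by decide)
        have n6 : ¬ _ := fun h => absurd ((C6.1 h).1.symm.trans hd) (by decide)
        have n7 : ¬ _ := fun h => absurd ((C7.1 h).1.symm.trans hd) (by decide)
        have n8 : ¬ _ := fun h => absurd ((C8.1 h).1.symm.trans hd) (by decide)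
        have n9 : ¬ _ := fun h => absurd ((C9.1 h).1.symm.trans hd) (by decide)
        have n10 : ¬ _ := fun h => absurd ((C10.1 h).1.symm.trans hd) (by decide)
        have n11 : ¬ _ := fun h => absurd ((C11.1 h).1.symm.trans hd) (by decide)
        have n12 : ¬ _ := fun h => absurd ((C12.1 h).1.symm.trans hd) (by decide)
        cases rest with
        | nil =>
            have n1 : ¬ _ := fun h => by
              obtain ⟨_, w1, t, ht, _⟩ := C1.1 h; simp at ht
            have n2 : ¬ _ := fun h => by
              obtain ⟨_, w1, t, ht, _⟩ := C2.1 h; simp at ht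
            rw [if_neg n1, if_neg n2, if_neg n3, if_neg n4, if_neg n5, if_neg n6, if_neg n7,
              if_neg n8, if_neg n9, if_neg n10, if_neg n11, if_neg n12]
            simp [hd]
        | cons w1 rt =>
            cases rt with
            | nil =>
                have n1 : ¬ _ := fun h => by
                  obtain ⟨_, w1', t, ht, _, htne⟩ := C1.1 h
                  simp at ht
                  exact htne ht.2
                have n2 : ¬ _ := fun h => by
                  obtain ⟨_, w1', t, ht, _, htne⟩ := C2.1 h
                  simp at ht
                  exact htne ht.2
                rw [if_neg n1, if_neg n2, if_neg n3, if_neg n4, if_neg n5, if_neg n6, if_neg n7,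
                  if_neg n8, if_neg n9, if_neg n10, if_neg n11, if_neg n12]
                simp [hd]
            | cons w2 t =>
                by_cases s1 : PySem.Str.lower w1 = "want"
                · have p1 : _ := C1.2 ⟨hd, w1, w2 :: t, rfl, s1, by simp⟩
                  rw [if_pos p1]
                  rw [pvDoubleHit w0 w1 w2 t hgood "doesn't" "want" hd s1 _
                    (by simp [PySem.Str.len_eq])]
                  simp [hd, s1]
                · by_cases s2 : PySem.Str.lower w1 = "like"
                  · have n1 : ¬ _ := fun h => by
                      obtain ⟨_, w1', t', ht, hw, _⟩ := C1.1 h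
                      simp at ht
                      rw [← ht.1] at hw
                      exact s1 hw
                    have p2 : _ := C2.2 ⟨hd, w1, w2 :: t, rfl, s2, by simp⟩
                    rw [if_neg n1, if_pos p2]
                    rw [pvDoubleHit w0 w1 w2 t hgood "doesn't" "like" hd s2 _
                      (by simp [PySem.Str.len_eq])]
                    simp [hd, s2]
                  · have n1 : ¬ _ := fun h => by
                      obtain ⟨_, w1', t', ht, hw, _⟩ := C1.1 h
                      simp at ht
                      rw [← ht.1] at hw
                      exact s1 hw
                    have n2 : ¬ _ := fun h => by
                      obtain ⟨_, w1', t', ht, hw, _⟩ := C2.1 h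
                      simp at ht
                      rw [← ht.1] at hw
                      exact s2 hw
                    rw [if_neg n1, if_neg n2, if_neg n3, if_neg n4, if_neg n5, if_neg n6,
                      if_neg n7, if_neg n8, if_neg n9, if_neg n10, if_neg n11, if_neg n12]
                    simp [hd, s1, s2]
      · -- first word is not "doesn't": the two-word patterns never fire
        have n1 : ¬ _ := fun h => hd (C1.1 h).1
        have n2 : ¬ _ := fun h => hd (C2.1 h).1
        rw [if_neg n1, if_neg n2]
        by_cases k3 : PySem.Str.lower w0 = "prefers"
        · cases rest with
          | nil =>
              have m3 : ¬ _ := fun h => (C3.1 h).2 rfl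
              have m4 : ¬ _ := fun h => absurd ((C4.1 h).1.symm.trans k3) (by decide)
              have m5 : ¬ _ := fun h => absurd ((C5.1 h).1.symm.trans k3) (by decide)
              have m6 : ¬ _ := fun h => absurd ((C6.1 h).1.symm.trans k3) (by decide)
              have m7 : ¬ _ := fun h => absurd ((C7.1 h).1.symm.trans k3) (by decide)
              have m8 : ¬ _ := fun h => absurd ((C8.1 h).1.symm.trans k3) (by decide)
              have m9 : ¬ _ := fun h => absurd ((C9.1 h).1.symm.trans k3) (by decide)
              have m10 : ¬ _ := fun h => absurd ((C10.1 h).1.symm.trans k3) (by decide)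
              have m11 : ¬ _ := fun h => absurd ((C11.1 h).1.symm.trans k3) (by decide)
              have m12 : ¬ _ := fun h => absurd ((C12.1 h).1.symm.trans k3) (by decide)
              rw [if_neg m3, if_neg m4, if_neg m5, if_neg m6, if_neg m7, if_neg m8, if_neg m9, if_neg m10, if_neg m11, if_neg m12]
              simp [k3, show PySem.Dict.get? pvSingle "prefers" = some "prefers" from by decide]
          | cons r0 rt =>
              have p : _ := C3.2 ⟨k3, by simp⟩
              rw [if_pos p]
              rw [pvSingleHit w0 r0 rt hgood "prefers" k3 _ (by simp [PySem.Str.len_eq])]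
              simp [k3, show PySem.Dict.get? pvSingle "prefers" = some "prefers" from by decide]
        · 
          by_cases k4 : PySem.Str.lower w0 = "likes"
          · cases rest with
            | nil =>
                have m3 : ¬ _ := fun h => absurd ((C3.1 h).1.symm.trans k4) (by decide)
                have m4 : ¬ _ := fun h => (C4.1 h).2 rfl
                have m5 : ¬ _ := fun h => absurd ((C5.1 h).1.symm.trans k4) (by decide)
                have m6 : ¬ _ := fun h => absurd ((C6.1 h).1.symm.trans k4) (by decide)
                have m7 : ¬ _ := fun h => absurd ((C7.1 h).1.symm.trans k4) (by decide)
                have m8 : ¬ _ := fun h => absurd ((C8.1 h).1.symm.trans k4) (by decide)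
                have m9 : ¬ _ := fun h => absurd ((C9.1 h).1.symm.trans k4) (by decide)
                have m10 : ¬ _ := fun h => absurd ((C10.1 h).1.symm.trans k4) (by decide)
                have m11 : ¬ _ := fun h => absurd ((C11.1 h).1.symm.trans k4) (by decide)
                have m12 : ¬ _ := fun h => absurd ((C12.1 h).1.symm.trans k4) (by decide)
                rw [if_neg m3, if_neg m4, if_neg m5, if_neg m6, if_neg m7, if_neg m8, if_neg m9, if_neg m10, if_neg m11, if_neg m12]
                simp [k4, show PySem.Dict.get? pvSingle "likes" = some "likes" from by decide]
            | cons r0 rt =>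
                have m3 : ¬ _ := fun h => absurd ((C3.1 h).1.symm.trans k4) (by decide)
                have p : _ := C4.2 ⟨k4, by simp⟩
                rw [if_neg m3, if_pos p]
                rw [pvSingleHit w0 r0 rt hgood "likes" k4 _ (by simp [PySem.Str.len_eq])]
                simp [k4, show PySem.Dict.get? pvSingle "likes" = some "likes" from by decide]
          · 
            by_cases k5 : PySem.Str.lower w0 = "loves"
            · cases rest with
              | nil =>
                  have m3 : ¬ _ := fun h => absurd ((C3.1 h).1.symm.trans k5) (by decide)
                  have m4 : ¬ _ := fun h => absurd ((C4.1 h).1.symm.trans k5) (by decide)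
                  have m5 : ¬ _ := fun h => (C5.1 h).2 rfl
                  have m6 : ¬ _ := fun h => absurd ((C6.1 h).1.symm.trans k5) (by decide)
                  have m7 : ¬ _ := fun h => absurd ((C7.1 h).1.symm.trans k5) (by decide)
                  have m8 : ¬ _ := fun h => absurd ((C8.1 h).1.symm.trans k5) (by decide)
                  have m9 : ¬ _ := fun h => absurd ((C9.1 h).1.symm.trans k5) (by decide)
                  have m10 : ¬ _ := fun h => absurd ((C10.1 h).1.symm.trans k5) (by decide)
                  have m11 : ¬ _ := fun h => absurd ((C11.1 h).1.symm.trans k5) (by decide)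
                  have m12 : ¬ _ := fun h => absurd ((C12.1 h).1.symm.trans k5) (by decide)
                  rw [if_neg m3, if_neg m4, if_neg m5, if_neg m6, if_neg m7, if_neg m8, if_neg m9, if_neg m10, if_neg m11, if_neg m12]
                  simp [k5, show PySem.Dict.get? pvSingle "loves" = some "likes" from by decide]
              | cons r0 rt =>
                  have m3 : ¬ _ := fun h => absurd ((C3.1 h).1.symm.trans k5) (by decide)
                  have m4 : ¬ _ := fun h => absurd ((C4.1 h).1.symm.trans k5) (by decide)
                  have p : _ := C5.2 ⟨k5, by simp⟩
                  rw [if_neg m3, if_neg m4, if_pos p]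
                  rw [pvSingleHit w0 r0 rt hgood "loves" k5 _ (by simp [PySem.Str.len_eq])]
                  simp [k5, show PySem.Dict.get? pvSingle "loves" = some "likes" from by decide]
            · 
              by_cases k6 : PySem.Str.lower w0 = "enjoys"
              · cases rest with
                | nil =>
                    have m3 : ¬ _ := fun h => absurd ((C3.1 h).1.symm.trans k6) (by decide)
                    have m4 : ¬ _ := fun h => absurd ((C4.1 h).1.symm.trans k6) (by decide)
                    have m5 : ¬ _ := fun h => absurd ((C5.1 h).1.symm.trans k6) (by decide)
                    have m6 : ¬ _ := fun h => (C6.1 h).2 rfl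
                    have m7 : ¬ _ := fun h => absurd ((C7.1 h).1.symm.trans k6) (by decide)
                    have m8 : ¬ _ := fun h => absurd ((C8.1 h).1.symm.trans k6) (by decide)
                    have m9 : ¬ _ := fun h => absurd ((C9.1 h).1.symm.trans k6) (by decide)
                    have m10 : ¬ _ := fun h => absurd ((C10.1 h).1.symm.trans k6) (by decide)
                    have m11 : ¬ _ := fun h => absurd ((C11.1 h).1.symm.trans k6) (by decide)
                    have m12 : ¬ _ := fun h => absurd ((C12.1 h).1.symm.trans k6) (by decide)
                    rw [if_neg m3, if_neg m4, if_neg m5, if_neg m6, if_neg m7, if_neg m8, if_neg m9, if_neg m10, if_neg m11, if_neg m12]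
                    simp [k6, show PySem.Dict.get? pvSingle "enjoys" = some "likes" from by decide]
                | cons r0 rt =>
                    have m3 : ¬ _ := fun h => absurd ((C3.1 h).1.symm.trans k6) (by decide)
                    have m4 : ¬ _ := fun h => absurd ((C4.1 h).1.symm.trans k6) (by decide)
                    have m5 : ¬ _ := fun h => absurd ((C5.1 h).1.symm.trans k6) (by decide)
                    have p : _ := C6.2 ⟨k6, by simp⟩
                    rw [if_neg m3, if_neg m4, if_neg m5, if_pos p]
                    rw [pvSingleHit w0 r0 rt hgood "enjoys" k6 _ (by simp [PySem.Str.len_eq])]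
                    simp [k6, show PySem.Dict.get? pvSingle "enjoys" = some "likes" from by decide]
              · 
                by_cases k7 : PySem.Str.lower w0 = "wants"
                · cases rest with
                  | nil =>
                      have m3 : ¬ _ := fun h => absurd ((C3.1 h).1.symm.trans k7) (by decide)
                      have m4 : ¬ _ := fun h => absurd ((C4.1 h).1.symm.trans k7) (by decide)
                      have m5 : ¬ _ := fun h => absurd ((C5.1 h).1.symm.trans k7) (by decide)
                      have m6 : ¬ _ := fun h => absurd ((C6.1 h).1.symm.trans k7) (by decide)
                      have m7 : ¬ _ := fun h => (C7.1 h).2 rfl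
                      have m8 : ¬ _ := fun h => absurd ((C8.1 h).1.symm.trans k7) (by decide)
                      have m9 : ¬ _ := fun h => absurd ((C9.1 h).1.symm.trans k7) (by decide)
                      have m10 : ¬ _ := fun h => absurd ((C10.1 h).1.symm.trans k7) (by decide)
                      have m11 : ¬ _ := fun h => absurd ((C11.1 h).1.symm.trans k7) (by decide)
                      have m12 : ¬ _ := fun h => absurd ((C12.1 h).1.symm.trans k7) (by decide)
                      rw [if_neg m3, if_neg m4, if_neg m5, if_neg m6, if_neg m7, if_neg m8, if_neg m9, if_neg m10, if_neg m11, if_neg m12]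
                      simp [k7, show PySem.Dict.get? pvSingle "wants" = some "wants" from by decide]
                  | cons r0 rt =>
                      have m3 : ¬ _ := fun h => absurd ((C3.1 h).1.symm.trans k7) (by decide)
                      have m4 : ¬ _ := fun h => absurd ((C4.1 h).1.symm.trans k7) (by decide)
                      have m5 : ¬ _ := fun h => absurd ((C5.1 h).1.symm.trans k7) (by decide)
                      have m6 : ¬ _ := fun h => absurd ((C6.1 h).1.symm.trans k7) (by decide)
                      have p : _ := C7.2 ⟨k7, by simp⟩
                      rw [if_neg m3, if_neg m4, if_neg m5, if_neg m6, if_pos p]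
                      rw [pvSingleHit w0 r0 rt hgood "wants" k7 _ (by simp [PySem.Str.len_eq])]
                      simp [k7, show PySem.Dict.get? pvSingle "wants" = some "wants" from by decide]
                · 
                  by_cases k8 : PySem.Str.lower w0 = "needs"
                  · cases rest with
                    | nil =>
                        have m3 : ¬ _ := fun h => absurd ((C3.1 h).1.symm.trans k8) (by decide)
                        have m4 : ¬ _ := fun h => absurd ((C4.1 h).1.symm.trans k8) (by decide)
                        have m5 : ¬ _ := fun h => absurd ((C5.1 h).1.symm.trans k8) (by decide)
                        have m6 : ¬ _ := fun h => absurd ((C6.1 h).1.symm.trans k8) (by decide)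
                        have m7 : ¬ _ := fun h => absurd ((C7.1 h).1.symm.trans k8) (by decide)
                        have m8 : ¬ _ := fun h => (C8.1 h).2 rfl
                        have m9 : ¬ _ := fun h => absurd ((C9.1 h).1.symm.trans k8) (by decide)
                        have m10 : ¬ _ := fun h => absurd ((C10.1 h).1.symm.trans k8) (by decide)
                        have m11 : ¬ _ := fun h => absurd ((C11.1 h).1.symm.trans k8) (by decide)
                        have m12 : ¬ _ := fun h => absurd ((C12.1 h).1.symm.trans k8) (by decide)
                        rw [if_neg m3, if_neg m4, if_neg m5, if_neg m6, if_neg m7, if_neg m8, if_neg m9, if_neg m10, if_neg m11, if_neg m12]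
                        simp [k8, show PySem.Dict.get? pvSingle "needs" = some "needs" from by decide]
                    | cons r0 rt =>
                        have m3 : ¬ _ := fun h => absurd ((C3.1 h).1.symm.trans k8) (by decide)
                        have m4 : ¬ _ := fun h => absurd ((C4.1 h).1.symm.trans k8) (by decide)
                        have m5 : ¬ _ := fun h => absurd ((C5.1 h).1.symm.trans k8) (by decide)
                        have m6 : ¬ _ := fun h => absurd ((C6.1 h).1.symm.trans k8) (by decide)
                        have m7 : ¬ _ := fun h => absurd ((C7.1 h).1.symm.trans k8) (by decide)
                        have p : _ := C8.2 ⟨k8, by simp⟩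
                        rw [if_neg m3, if_neg m4, if_neg m5, if_neg m6, if_neg m7, if_pos p]
                        rw [pvSingleHit w0 r0 rt hgood "needs" k8 _ (by simp [PySem.Str.len_eq])]
                        simp [k8, show PySem.Dict.get? pvSingle "needs" = some "needs" from by decide]
                  · 
                    by_cases k9 : PySem.Str.lower w0 = "uses"
                    · cases rest with
                      | nil =>
                          have m3 : ¬ _ := fun h => absurd ((C3.1 h).1.symm.trans k9) (by decide)
                          have m4 : ¬ _ := fun h => absurd ((C4.1 h).1.symm.trans k9) (by decide)
                          have m5 : ¬ _ := fun h => absurd ((C5.1 h).1.symm.trans k9) (by decide)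
                          have m6 : ¬ _ := fun h => absurd ((C6.1 h).1.symm.trans k9) (by decide)
                          have m7 : ¬ _ := fun h => absurd ((C7.1 h).1.symm.trans k9) (by decide)
                          have m8 : ¬ _ := fun h => absurd ((C8.1 h).1.symm.trans k9) (by decide)
                          have m9 : ¬ _ := fun h => (C9.1 h).2 rfl
                          have m10 : ¬ _ := fun h => absurd ((C10.1 h).1.symm.trans k9) (by decide)
                          have m11 : ¬ _ := fun h => absurd ((C11.1 h).1.symm.trans k9) (by decide)
                          have m12 : ¬ _ := fun h => absurd ((C12.1 h).1.symm.trans k9) (by decide)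
                          rw [if_neg m3, if_neg m4, if_neg m5, if_neg m6, if_neg m7, if_neg m8, if_neg m9, if_neg m10, if_neg m11, if_neg m12]
                          simp [k9, show PySem.Dict.get? pvSingle "uses" = some "uses" from by decide]
                      | cons r0 rt =>
                          have m3 : ¬ _ := fun h => absurd ((C3.1 h).1.symm.trans k9) (by decide)
                          have m4 : ¬ _ := fun h => absurd ((C4.1 h).1.symm.trans k9) (by decide)
                          have m5 : ¬ _ := fun h => absurd ((C5.1 h).1.symm.trans k9) (by decide)
                          have m6 : ¬ _ := fun h => absurd ((C6.1 h).1.symm.trans k9) (by decide)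
                          have m7 : ¬ _ := fun h => absurd ((C7.1 h).1.symm.trans k9) (by decide)
                          have m8 : ¬ _ := fun h => absurd ((C8.1 h).1.symm.trans k9) (by decide)
                          have p : _ := C9.2 ⟨k9, by simp⟩
                          rw [if_neg m3, if_neg m4, if_neg m5, if_neg m6, if_neg m7, if_neg m8, if_pos p]
                          rw [pvSingleHit w0 r0 rt hgood "uses" k9 _ (by simp [PySem.Str.len_eq])]
                          simp [k9, show PySem.Dict.get? pvSingle "uses" = some "uses" from by decide]
                    · 
                      by_cases k10 : PySem.Str.lower w0 = "using"
                      · cases rest with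
                        | nil =>
                            have m3 : ¬ _ := fun h => absurd ((C3.1 h).1.symm.trans k10) (by decide)
                            have m4 : ¬ _ := fun h => absurd ((C4.1 h).1.symm.trans k10) (by decide)
                            have m5 : ¬ _ := fun h => absurd ((C5.1 h).1.symm.trans k10) (by decide)
                            have m6 : ¬ _ := fun h => absurd ((C6.1 h).1.symm.trans k10) (by decide)
                            have m7 : ¬ _ := fun h => absurd ((C7.1 h).1.symm.trans k10) (by decide)
                            have m8 : ¬ _ := fun h => absurd ((C8.1 h).1.symm.trans k10) (by decide)
                            have m9 : ¬ _ := fun h => absurd ((C9.1 h).1.symm.trans k10) (by decide)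
                            have m10 : ¬ _ := fun h => (C10.1 h).2 rfl
                            have m11 : ¬ _ := fun h => absurd ((C11.1 h).1.symm.trans k10) (by decide)
                            have m12 : ¬ _ := fun h => absurd ((C12.1 h).1.symm.trans k10) (by decide)
                            rw [if_neg m3, if_neg m4, if_neg m5, if_neg m6, if_neg m7, if_neg m8, if_neg m9, if_neg m10, if_neg m11, if_neg m12]
                            simp [k10, show PySem.Dict.get? pvSingle "using" = some "uses" from by decide]
                        | cons r0 rt =>
                            have m3 : ¬ _ := fun h => absurd ((C3.1 h).1.symm.trans k10) (by decide)
                            have m4 : ¬ _ := fun h => absurd ((C4.1 h).1.symm.trans k10) (by decide)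
                            have m5 : ¬ _ := fun h => absurd ((C5.1 h).1.symm.trans k10) (by decide)
                            have m6 : ¬ _ := fun h => absurd ((C6.1 h).1.symm.trans k10) (by decide)
                            have m7 : ¬ _ := fun h => absurd ((C7.1 h).1.symm.trans k10) (by decide)
                            have m8 : ¬ _ := fun h => absurd ((C8.1 h).1.symm.trans k10) (by decide)
                            have m9 : ¬ _ := fun h => absurd ((C9.1 h).1.symm.trans k10) (by decide)
                            have p : _ := C10.2 ⟨k10, by simp⟩
                            rw [if_neg m3, if_neg m4, if_neg m5, if_neg m6, if_neg m7, if_neg m8, if_neg m9, if_pos p]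
                            rw [pvSingleHit w0 r0 rt hgood "using" k10 _ (by simp [PySem.Str.len_eq])]
                            simp [k10, show PySem.Dict.get? pvSingle "using" = some "uses" from by decide]
                      · 
                        by_cases k11 : PySem.Str.lower w0 = "has"
                        · cases rest with
                          | nil =>
                              have m3 : ¬ _ := fun h => absurd ((C3.1 h).1.symm.trans k11) (by decide)
                              have m4 : ¬ _ := fun h => absurd ((C4.1 h).1.symm.trans k11) (by decide)
                              have m5 : ¬ _ := fun h => absurd ((C5.1 h).1.symm.trans k11) (by decide)
                              have m6 : ¬ _ := fun h => absurd ((C6.1 h).1.symm.trans k11) (by decide)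
                              have m7 : ¬ _ := fun h => absurd ((C7.1 h).1.symm.trans k11) (by decide)
                              have m8 : ¬ _ := fun h => absurd ((C8.1 h).1.symm.trans k11) (by decide)
                              have m9 : ¬ _ := fun h => absurd ((C9.1 h).1.symm.trans k11) (by decide)
                              have m10 : ¬ _ := fun h => absurd ((C10.1 h).1.symm.trans k11) (by decide)
                              have m11 : ¬ _ := fun h => (C11.1 h).2 rfl
                              have m12 : ¬ _ := fun h => absurd ((C12.1 h).1.symm.trans k11) (by decide)
                              rw [if_neg m3, if_neg m4, if_neg m5, if_neg m6, if_neg m7, if_neg m8, if_neg m9, if_neg m10, if_neg m11, if_neg m12]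
                              simp [k11, show PySem.Dict.get? pvSingle "has" = some "has" from by decide]
                          | cons r0 rt =>
                              have m3 : ¬ _ := fun h => absurd ((C3.1 h).1.symm.trans k11) (by decide)
                              have m4 : ¬ _ := fun h => absurd ((C4.1 h).1.symm.trans k11) (by decide)
                              have m5 : ¬ _ := fun h => absurd ((C5.1 h).1.symm.trans k11) (by decide)
                              have m6 : ¬ _ := fun h => absurd ((C6.1 h).1.symm.trans k11) (by decide)
                              have m7 : ¬ _ := fun h => absurd ((C7.1 h).1.symm.trans k11) (by decide)
                              have m8 : ¬ _ := fun h => absurd ((C8.1 h).1.symm.trans k11) (by decide)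
                              have m9 : ¬ _ := fun h => absurd ((C9.1 h).1.symm.trans k11) (by decide)
                              have m10 : ¬ _ := fun h => absurd ((C10.1 h).1.symm.trans k11) (by decide)
                              have p : _ := C11.2 ⟨k11, by simp⟩
                              rw [if_neg m3, if_neg m4, if_neg m5, if_neg m6, if_neg m7, if_neg m8, if_neg m9, if_neg m10, if_pos p]
                              rw [pvSingleHit w0 r0 rt hgood "has" k11 _ (by simp [PySem.Str.len_eq])]
                              simp [k11, show PySem.Dict.get? pvSingle "has" = some "has" from by decide]
                        · 
                          by_cases k12 : PySem.Str.lower w0 = "on"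
                          · cases rest with
                            | nil =>
                                have m3 : ¬ _ := fun h => absurd ((C3.1 h).1.symm.trans k12) (by decide)
                                have m4 : ¬ _ := fun h => absurd ((C4.1 h).1.symm.trans k12) (by decide)
                                have m5 : ¬ _ := fun h => absurd ((C5.1 h).1.symm.trans k12) (by decide)
                                have m6 : ¬ _ := fun h => absurd ((C6.1 h).1.symm.trans k12) (by decide)
                                have m7 : ¬ _ := fun h => absurd ((C7.1 h).1.symm.trans k12) (by decide)
                                have m8 : ¬ _ := fun h => absurd ((C8.1 h).1.symm.trans k12) (by decide)
                                have m9 : ¬ _ := fun h => absurd ((C9.1 h).1.symm.trans k12) (by decide)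
                                have m10 : ¬ _ := fun h => absurd ((C10.1 h).1.symm.trans k12) (by decide)
                                have m11 : ¬ _ := fun h => absurd ((C11.1 h).1.symm.trans k12) (by decide)
                                have m12 : ¬ _ := fun h => (C12.1 h).2 rfl
                                rw [if_neg m3, if_neg m4, if_neg m5, if_neg m6, if_neg m7, if_neg m8, if_neg m9, if_neg m10, if_neg m11, if_neg m12]
                                simp [k12, show PySem.Dict.get? pvSingle "on" = some "uses" from by decide]
                            | cons r0 rt =>
                                have m3 : ¬ _ := fun h => absurd ((C3.1 h).1.symm.trans k12) (by decide)
                                have m4 : ¬ _ := fun h => absurd ((C4.1 h).1.symm.trans k12) (by decide)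
                                have m5 : ¬ _ := fun h => absurd ((C5.1 h).1.symm.trans k12) (by decide)
                                have m6 : ¬ _ := fun h => absurd ((C6.1 h).1.symm.trans k12) (by decide)
                                have m7 : ¬ _ := fun h => absurd ((C7.1 h).1.symm.trans k12) (by decide)
                                have m8 : ¬ _ := fun h => absurd ((C8.1 h).1.symm.trans k12) (by decide)
                                have m9 : ¬ _ := fun h => absurd ((C9.1 h).1.symm.trans k12) (by decide)
                                have m10 : ¬ _ := fun h => absurd ((C10.1 h).1.symm.trans k12) (by decide)
                                have m11 : ¬ _ := fun h => absurd ((C11.1 h).1.symm.trans k12) (by decide)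
                                have p : _ := C12.2 ⟨k12, by simp⟩
                                rw [if_neg m3, if_neg m4, if_neg m5, if_neg m6, if_neg m7, if_neg m8, if_neg m9, if_neg m10, if_neg m11, if_pos p]
                                rw [pvSingleHit w0 r0 rt hgood "on" k12 _ (by simp [PySem.Str.len_eq])]
                                simp [k12, show PySem.Dict.get? pvSingle "on" = some "uses" from by decide]
                          · 
                            have m3 : ¬ _ := fun h => k3 (C3.1 h).1
                            have m4 : ¬ _ := fun h => k4 (C4.1 h).1
                            have m5 : ¬ _ := fun h => k5 (C5.1 h).1
                            have m6 : ¬ _ := fun h => k6 (C6.1 h).1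
                            have m7 : ¬ _ := fun h => k7 (C7.1 h).1
                            have m8 : ¬ _ := fun h => k8 (C8.1 h).1
                            have m9 : ¬ _ := fun h => k9 (C9.1 h).1
                            have m10 : ¬ _ := fun h => k10 (C10.1 h).1
                            have m11 : ¬ _ := fun h => k11 (C11.1 h).1
                            have m12 : ¬ _ := fun h => k12 (C12.1 h).1
                            have hnone := pvGet_none (PySem.Str.lower w0) k3 k4 k5 k6 k7 k8 k9 k10 k11 k12
                            rw [if_neg m3, if_neg m4, if_neg m5, if_neg m6, if_neg m7, if_neg m8, if_neg m9, if_neg m10, if_neg m11, if_neg m12]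
                            simp [hd, hnone]

theorem parse_relation_content_py_spec : Claim_equal_parse_relation_content_py := by
  intro content _
  unfold Spec_parse_relation_content_py
  exact pvMain content
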